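-- pv_equiv track=rewrite | github.com/GeorgeKovshov/codewars2 | codewars10.py | find_arr2
-- ===== SOURCE A (Python) =====
-- def find_arr2(arrA, arrB, rng, wanted):
--     check = 0 if wanted == "even" else 1
--     dictA = {}
--     for x in arrA:
--         if x <= rng[1] and x >= rng[0] and x % 2 == check:
--             if x not in dictA:
--                 dictA[x] = 0
--             dictA[x] -= 1
--     result = []
--     for x in arrB:
--         if x not in dictA or dictA[x] == -1:
--             continue
--         if dictA[x] < 0:
--             dictA[x] = 0
--         dictA[x] += 1
--         if dictA[x] == 2:
--             result.append(x)
--     result.sort()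
--     return result
-- ===== SOURCE B (Python) =====
-- def find_arr2(arrA, arrB, rng, wanted):
--     check = 0 if wanted == "even" else 1
--     countA = {}
--     for x in arrA:
--         if x <= rng[1] and x >= rng[0] and x % 2 == check:
--             countA[x] = countA.get(x, 0) + 1
--     countB = {}
--     for x in arrB:
--         countB[x] = countB.get(x, 0) + 1
--     return sorted(x for x in countA if countA[x] >= 2 and countB.get(x, 0) >= 2)
-- ===== Notes on version B (the rewrite author's own statement) =====
-- stated objective: simpler
-- what changed: Replaces A's interleaved in-place state machine over one dict (negative sentinel counts flipped to positive while scanning arrB, appending at the exact second match) with two plain counting passes and one final threshold filter: emit x iff x occurs >=2 times filtered in arrA and >=2 times in arrB, sorted.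
import Mathlib
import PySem

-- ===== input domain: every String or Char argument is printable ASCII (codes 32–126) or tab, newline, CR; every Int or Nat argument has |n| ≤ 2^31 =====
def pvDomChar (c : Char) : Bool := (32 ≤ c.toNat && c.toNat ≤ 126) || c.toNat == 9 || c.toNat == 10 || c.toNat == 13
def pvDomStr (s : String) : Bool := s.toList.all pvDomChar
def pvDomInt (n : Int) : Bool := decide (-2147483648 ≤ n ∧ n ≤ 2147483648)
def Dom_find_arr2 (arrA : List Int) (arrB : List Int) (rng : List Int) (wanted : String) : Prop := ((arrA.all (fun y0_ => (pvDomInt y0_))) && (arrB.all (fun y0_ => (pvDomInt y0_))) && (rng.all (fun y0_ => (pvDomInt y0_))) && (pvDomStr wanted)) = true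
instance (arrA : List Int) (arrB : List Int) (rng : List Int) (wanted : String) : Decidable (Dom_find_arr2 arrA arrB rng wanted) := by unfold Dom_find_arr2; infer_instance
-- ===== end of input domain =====

-- B replaces A's interleaved one-dict state machine by two counting passes and a final
-- threshold filter (x emitted iff ≥2 filtered occurrences in arrA and ≥2 in arrB), sorted.

-- ===== PORT A =====
def find_arr2 (arrA : List Int) (arrB : List Int) (rng : List Int) (wanted : String) : List Int :=
  let check : Int := if wanted = "even" then 0 else 1
  let dictA : PySem.Dict Int Int := arrA.foldl (fun d x =>
    if x ≤ PySem.List.pyGetD rng 1 0 ∧ PySem.List.pyGetD rng 0 0 ≤ x ∧ PySem.Int.mod x 2 = check then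
      let d1 := if ¬ d.contains x then d.insert x 0 else d
      d1.insert x (d1.getD x 0 - 1)
    else d) PySem.Dict.empty
  let st := arrB.foldl (fun (p : PySem.Dict Int Int × List Int) x =>
    if ¬ p.1.contains x ∨ p.1.getD x 0 = -1 then p
    else
      let d1 := if p.1.getD x 0 < 0 then p.1.insert x 0 else p.1
      let d2 := d1.insert x (d1.getD x 0 + 1)
      let res := if d2.getD x 0 = 2 then p.2 ++ [x] else p.2
      (d2, res)) (dictA, [])
  PySem.List.sorted st.2 (fun x => x) false

-- ===== PORT B =====
def find_arr2_alt (arrA : List Int) (arrB : List Int) (rng : List Int) (wanted : String) : List Int :=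
  let check : Int := if wanted = "even" then 0 else 1
  let countA : PySem.Dict Int Int := arrA.foldl (fun d x =>
    if x ≤ PySem.List.pyGetD rng 1 0 ∧ PySem.List.pyGetD rng 0 0 ≤ x ∧ PySem.Int.mod x 2 = check then
      d.insert x (d.getD x 0 + 1)
    else d) PySem.Dict.empty
  let countB : PySem.Dict Int Int := arrB.foldl (fun d x => d.insert x (d.getD x 0 + 1)) PySem.Dict.empty
  PySem.List.sorted (countA.keys.filter (fun x => 2 ≤ countA.getD x 0 ∧ 2 ≤ countB.getD x 0)) (fun x => x) false

-- ===== PRECONDITION & SPEC =====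
-- Pre_ excludes exactly the inputs where A raises IndexError: arrA nonempty with rng shorter
-- than 2 (the body reads rng[1] and rng[0] for every element of arrA).
def Pre_find_arr2 (arrA : List Int) (arrB : List Int) (rng : List Int) (wanted : String) : Prop :=
  arrA = [] ∨ 2 ≤ rng.length
instance (arrA : List Int) (arrB : List Int) (rng : List Int) (wanted : String) : Decidable (Pre_find_arr2 arrA arrB rng wanted) := by unfold Pre_find_arr2; infer_instance

def pvWitness_find_arr2 : List Int × List Int × List Int × String := ([2, 2, 4], [2, 2], [1, 5], "even")

def Spec_find_arr2 (arrA : List Int) (arrB : List Int) (rng : List Int) (wanted : String) (out : List Int) : Prop := out = find_arr2_alt arrA arrB rng wanted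
instance (arrA : List Int) (arrB : List Int) (rng : List Int) (wanted : String) (out : List Int) : Decidable (Spec_find_arr2 arrA arrB rng wanted out) := by unfold Spec_find_arr2; infer_instance

-- ===== CLAIM (what is proved, stated in full; the proofs are below) =====
def Claim_equal_find_arr2 : Prop := ∀ (arrA : List Int) (arrB : List Int) (rng : List Int) (wanted : String), Dom_find_arr2 arrA arrB rng wanted → Pre_find_arr2 arrA arrB rng wanted → Spec_find_arr2 arrA arrB rng wanted (find_arr2 arrA arrB rng wanted)

-- ===== LEMMAS AND PROOFS =====


theorem pv_step1 (d : PySem.Dict Int Int) (x : Int) (y : Int) :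
    ((if ¬ d.contains x then d.insert x 0 else d).insert x
      ((if ¬ d.contains x then d.insert x 0 else d).getD x 0 - 1)).get? y =
    if y = x then some ((d.get? x).getD 0 - 1) else d.get? y := by
  by_cases hcon : d.contains x
  · simp [hcon, PySem.Dict.get?_insert, PySem.Dict.getD_eq_get?_getD]
  · have h0 : d.get? x = none := (PySem.Dict.get?_eq_none_iff_contains d x).mpr (by simpa using hcon)
    by_cases hy : y = x
    · simp [hcon, hy, PySem.Dict.get?_insert, PySem.Dict.getD_insert, h0]
    · simp [hcon, hy, PySem.Dict.get?_insert, PySem.Dict.getD_insert]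

theorem pv_loop1 (cond : Int → Prop) [DecidablePred cond] (l : List Int) (d : PySem.Dict Int Int) (y : Int) :
    (l.foldl (fun d x =>
      if cond x then
        let d1 := if ¬ d.contains x then d.insert x 0 else d
        d1.insert x (d1.getD x 0 - 1)
      else d) d).get? y =
    if (l.filter (fun x => cond x)).count y = 0 then d.get? y
    else some ((d.get? y).getD 0 - ((l.filter (fun x => cond x)).count y : Int)) := by
  induction l generalizing d with
  | nil => simp
  | cons a l ih =>
    simp only [List.foldl_cons, List.filter_cons]
    by_cases hc : cond a
    · simp only [hc, decide_true, if_true]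
      rw [ih, pv_step1 d a y]
      by_cases hy : y = a
      · subst hy
        rw [List.count_cons_self, if_pos rfl]
        by_cases h0 : (l.filter (fun x => cond x)).count y = 0
        · simp [h0]
        · rw [if_neg (by omega), if_neg (by omega)]
          simp only [Option.getD_some]
          congr 1
          push_cast
          ring
      · have hy2 : ¬ a = y := fun h => hy h.symm
        simp [hy, hy2]
    · simp only [hc, decide_false, if_false]
      exact ih d


def pvEnc (c : Nat) (k : Nat) : Option Int :=
  if c = 0 then none else if k = 0 then some (-(c : Int)) else if c = 1 then some (-1) else some (k : Int)

theorem pv_loop2 (cA : Int → Nat) (l : List Int) (d : PySem.Dict Int Int) (res : List Int) (K : Int → Nat)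
    (hd : ∀ y, d.get? y = pvEnc (cA y) (K y))
    (hnd : res.Nodup)
    (hmem : ∀ y, y ∈ res ↔ 2 ≤ cA y ∧ 2 ≤ K y) :
    (l.foldl (fun (p : PySem.Dict Int Int × List Int) x =>
      if ¬ p.1.contains x ∨ p.1.getD x 0 = -1 then p
      else
        let d1 := if p.1.getD x 0 < 0 then p.1.insert x 0 else p.1
        let d2 := d1.insert x (d1.getD x 0 + 1)
        let res := if d2.getD x 0 = 2 then p.2 ++ [x] else p.2
        (d2, res)) (d, res)).2.Nodup ∧
    ∀ y, y ∈ (l.foldl (fun (p : PySem.Dict Int Int × List Int) x =>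
      if ¬ p.1.contains x ∨ p.1.getD x 0 = -1 then p
      else
        let d1 := if p.1.getD x 0 < 0 then p.1.insert x 0 else p.1
        let d2 := d1.insert x (d1.getD x 0 + 1)
        let res := if d2.getD x 0 = 2 then p.2 ++ [x] else p.2
        (d2, res)) (d, res)).2 ↔ 2 ≤ cA y ∧ 2 ≤ K y + l.count y := by
  induction l generalizing d res K with
  | nil => exact ⟨hnd, by simpa using hmem⟩
  | cons x l ih =>
    simp only [List.foldl_cons]
    have hgetD : d.getD x 0 = (d.get? x).getD 0 := PySem.Dict.getD_eq_get?_getD d x 0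
    have hcont : d.contains x = (d.get? x).isSome := PySem.Dict.contains_eq_isSome_get? d x
    have key : ∃ d₂ res₂,
        ((if ¬ d.contains x ∨ d.getD x 0 = -1 then (d, res)
          else
            let d1 := if d.getD x 0 < 0 then d.insert x 0 else d
            let d2 := d1.insert x (d1.getD x 0 + 1)
            let res' := if d2.getD x 0 = 2 then res ++ [x] else res
            (d2, res')) : PySem.Dict Int Int × List Int) = (d₂, res₂) ∧
        (∀ y, d₂.get? y = pvEnc (cA y) (if y = x then K y + 1 else K y)) ∧
        res₂.Nodup ∧
        (∀ y, y ∈ res₂ ↔ 2 ≤ cA y ∧ 2 ≤ (if y = x then K y + 1 else K y)) := by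
      have hx := hd x
      by_cases c0 : cA x = 0
      · -- absent: skipped
        refine ⟨d, res, ?_, ?_, hnd, ?_⟩
        · rw [if_pos]
          left
          rw [hcont, hx]
          simp [pvEnc, c0]
        · intro y
          by_cases hy : y = x
          · subst hy; simp [hd y, pvEnc, c0]
          · simp [hd y, hy]
        · intro y
          by_cases hy : y = x
          · subst hy; simp [hmem y, c0]
          · simp [hmem y, hy]
      · by_cases c1 : cA x = 1
        · -- matched exactly once in arrA: value stays -1, skipped
          refine ⟨d, res, ?_, ?_, hnd, ?_⟩
          · rw [if_pos]
            right
            rw [hgetD, hx]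
            simp [pvEnc, c1]
          · intro y
            by_cases hy : y = x
            · subst hy; simp [hd y, pvEnc, c1]
            · simp [hd y, hy]
          · intro y
            by_cases hy : y = x
            · subst hy; simp [hmem y, c1]
            · simp [hmem y, hy]
        · -- cA x ≥ 2
          have c2 : 2 ≤ cA x := by omega
          have hval : d.get? x = some (if K x = 0 then -(cA x : Int) else (K x : Int)) := by
            rw [hx]
            simp only [pvEnc, c0, c1, if_false]
            split <;> rfl
          have hguard : ¬ (¬ d.contains x ∨ d.getD x 0 = -1) := by
            intro h
            rcases h with h | h
            · rw [hcont, hval] at h; simp at h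
            · rw [hgetD, hval] at h
              simp only [Option.getD_some] at h
              split at h <;> omega
          rw [if_neg hguard]
          by_cases k0 : K x = 0
          · -- first arrB occurrence: value -(cA x) → 0 → 1
            have hv : d.getD x 0 = -(cA x : Int) := by rw [hgetD, hval, if_pos k0]; rfl
            have hlt : d.getD x 0 < 0 := by rw [hv]; omega
            refine ⟨(d.insert x 0).insert x 1, res, ?_, ?_, hnd, ?_⟩
            · rw [if_pos hlt]
              simp [PySem.Dict.getD_insert_self]
            · intro y
              rw [PySem.Dict.get?_insert]
              by_cases hy : y = x
              · subst hy; simp [pvEnc, c0, c1, k0]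
              · rw [if_neg hy, PySem.Dict.get?_insert_of_ne _ _ hy, hd y, if_neg hy]
            · intro y
              by_cases hy : y = x
              · subst hy; simp [hmem y, k0]
              · simp [hmem y, hy]
          · -- later occurrences: value K x → K x + 1
            have hv : d.getD x 0 = (K x : Int) := by rw [hgetD, hval, if_neg k0]; rfl
            have hlt : ¬ d.getD x 0 < 0 := by rw [hv]; omega
            rw [if_neg hlt]
            have hv2 : (d.insert x (d.getD x 0 + 1)).getD x 0 = (K x : Int) + 1 := by
              rw [PySem.Dict.getD_insert_self, hv]
            by_cases k1 : K x = 1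
            · -- second occurrence: append
              refine ⟨d.insert x (d.getD x 0 + 1), res ++ [x], ?_, ?_, ?_, ?_⟩
              · simp [PySem.Dict.getD_insert_self, hv, k1]
              · intro y
                rw [PySem.Dict.get?_insert]
                by_cases hy : y = x
                · subst hy; rw [if_pos rfl, hv]; simp [pvEnc, c0, c1, k1]
                · rw [if_neg hy, hd y, if_neg hy]
              · rw [List.nodup_append]
                refine ⟨hnd, List.nodup_singleton x, ?_⟩
                intro a ha b hb
                rw [List.mem_singleton] at hb
                subst hb
                intro h
                subst h
                have := (hmem a).mp ha
                omega
              · intro y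
                rw [List.mem_append, List.mem_singleton, hmem y]
                by_cases hy : y = x
                · subst hy; simp [k1]; omega
                · simp [hy]
            · -- third or later: no append
              have k2 : 2 ≤ K x := by omega
              refine ⟨d.insert x (d.getD x 0 + 1), res, ?_, ?_, hnd, ?_⟩
              · have hne : ¬ ((K x : Int) + 1 = 2) := by omega
                simp [PySem.Dict.getD_insert_self, hv, hne]
              · intro y
                rw [PySem.Dict.get?_insert]
                by_cases hy : y = x
                · subst hy; rw [if_pos rfl, hv]; simp [pvEnc, c0, c1, k0]
                · rw [if_neg hy, hd y, if_neg hy]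
              · intro y
                by_cases hy : y = x
                · subst hy; simp [hmem y, k2]; omega
                · simp [hmem y, hy]
    obtain ⟨d₂, res₂, hstep, hd₂, hnd₂, hmem₂⟩ := key
    rw [hstep]
    obtain ⟨h1, h2⟩ := ih d₂ res₂ _ hd₂ hnd₂ hmem₂
    refine ⟨h1, fun y => ?_⟩
    rw [h2 y, List.count_cons]
    by_cases hy : y = x
    · subst hy; simp; omega
    · have hy2 : ¬ x = y := fun h => hy h.symm
      simp [hy, hy2]

-- loop over only the matching elements equals the filtered loop (List.foldl_filter, decide-normalised)
theorem pv_filter_foldl (cond : Int → Prop) [DecidablePred cond] (l : List Int) (d : PySem.Dict Int Int) :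
    l.foldl (fun d x => if cond x then d.insert x (d.getD x 0 + 1) else d) d
    = (l.filter (fun x => cond x)).foldl (fun d x => d.insert x (d.getD x 0 + 1)) d := by
  rw [List.foldl_filter]
  simp only [decide_eq_true_eq]

-- ===== VERDICT (by name: the statement is the Claim_ definition above) =====
theorem find_arr2_spec : Claim_equal_find_arr2 := by
  intro arrA arrB rng wanted _hdom _hpre
  unfold Spec_find_arr2 find_arr2 find_arr2_alt
  set check : Int := if wanted = "even" then 0 else 1 with hcheck
  set cond : Int → Prop := fun x =>
    x ≤ PySem.List.pyGetD rng 1 0 ∧ PySem.List.pyGetD rng 0 0 ≤ x ∧ PySem.Int.mod x 2 = check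
    with hcond
  set fl : List Int := arrA.filter (fun x => cond x) with hfl
  -- the dict after A's first loop
  have hd : ∀ y, (arrA.foldl (fun d x =>
      if cond x then
        let d1 := if ¬ d.contains x then d.insert x 0 else d
        d1.insert x (d1.getD x 0 - 1)
      else d) PySem.Dict.empty).get? y = pvEnc (fl.count y) ((fun _ => (0 : Nat)) y) := by
    intro y
    rw [pv_loop1 cond arrA PySem.Dict.empty y]
    by_cases h : fl.count y = 0
    · rw [hfl] at h
      simp [h, pvEnc, hfl]
    · rw [hfl] at h
      simp [h, pvEnc, hfl, PySem.Dict.get?_empty]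
  have h2 := pv_loop2 (fun y => fl.count y) arrB _ [] (fun _ => 0) hd List.nodup_nil (by simp)
  -- B's two counters
  have hCA : (arrA.foldl (fun d x => if cond x then d.insert x (d.getD x 0 + 1) else d)
      PySem.Dict.empty) = PySem.Dict.counter fl := by
    rw [pv_filter_foldl cond arrA PySem.Dict.empty, ← hfl,
      PySem.Dict.foldl_insert_getD_add_one_eq_counter]
  have hCB : (arrB.foldl (fun d x => d.insert x (d.getD x 0 + 1)) PySem.Dict.empty)
      = PySem.Dict.counter arrB := PySem.Dict.foldl_insert_getD_add_one_eq_counter arrB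
  apply PySem.List.sorted_eq_sorted_of_perm _ _ _ (fun a b h => h)
  rw [List.perm_ext_iff_of_nodup h2.1 (List.Nodup.filter _ (by rw [hCA, PySem.Dict.keys_counter]; exact PySem.Set.nodup_ofList fl))]
  intro a
  rw [List.mem_filter]
  constructor
  · intro ha
    have h : 2 ≤ List.count a fl ∧ 2 ≤ 0 + List.count a arrB := (h2.2 a).mp ha
    rw [hCA, hCB, PySem.Dict.keys_counter]
    refine ⟨(PySem.Set.mem_ofList fl a).mpr (List.count_pos_iff.mp (by omega)), ?_⟩
    simp only [PySem.Dict.getD_counter, decide_eq_true_eq]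
    constructor <;> · omega
  · intro ha
    rw [hCA, hCB, PySem.Dict.keys_counter] at ha
    obtain ⟨_hmem, hcnt⟩ := ha
    simp only [PySem.Dict.getD_counter, decide_eq_true_eq] at hcnt
    exact (h2.2 a).mpr (show 2 ≤ List.count a fl ∧ 2 ≤ 0 + List.count a arrB by omega)
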